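-- pv_equiv track=rewrite | github.com/5l1v3r1/passcrack | passcrack.py | leet_transforms
-- ===== SOURCE A (Python) =====
-- def leet_transforms(word):
--     output = []
--     i=0
--     for char in word:
--         if char in ('a', 'A'):
--             char = '4'
--         elif char in ('i', 'I'):
--             char = '1'
--         elif char in ('e', 'E'):
--             char = '3'
--         elif char in ('s', 'S'):
--             char = '5'
--         elif char in ('b', 'B'):
--             char = '8'
--         elif char in ('o', 'O'):
--             char = '0'
--         word = word[:i] + char + word[i + 1:]
--         i += 1
--         if word not in output:
--              output.append(word)
--     return output
-- ===== SOURCE B (Python) =====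
-- _T = str.maketrans("aAiIeEsSbBoO", "441133558800")
--
-- def leet_transforms(word):
--     # No dedup scan needed: state i equals an earlier state exactly when the
--     # character at position i is not substituted (and i > 0), since substituted
--     # characters always change.  So emit directly on that local test.
--     out = []
--     pref = ""
--     for i, c in enumerate(word):
--         t = c.translate(_T)
--         pref += t
--         if i == 0 or t != c:
--             out.append(pref + word[i + 1:])
--     return out
-- ===== Notes on version B (the rewrite author's own statement) =====
-- stated objective: faster
-- what changed: B drops A's linear membership scan over the output list entirely: a progressive state can only repeat the immediately preceding one, exactly when the current character has no leet substitute, so B emits each progressive string directly on that O(1) local test while maintaining the leeted prefix as an accumulator.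
import Mathlib
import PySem

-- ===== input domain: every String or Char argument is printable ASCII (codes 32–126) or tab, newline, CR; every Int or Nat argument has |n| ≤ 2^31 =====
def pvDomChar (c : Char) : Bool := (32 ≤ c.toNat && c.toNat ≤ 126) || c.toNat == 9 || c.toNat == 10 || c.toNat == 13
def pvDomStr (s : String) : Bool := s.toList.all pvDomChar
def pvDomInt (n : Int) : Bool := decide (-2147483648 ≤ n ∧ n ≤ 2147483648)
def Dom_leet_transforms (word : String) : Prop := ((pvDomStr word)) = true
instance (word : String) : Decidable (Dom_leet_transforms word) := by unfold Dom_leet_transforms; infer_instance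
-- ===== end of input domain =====

-- B removes A's `word not in output` membership scan: a progressive state can only
-- repeat the immediately preceding one (exactly when the current char has no leet
-- substitute), so B emits on that local test while accumulating the leeted prefix.


-- ===== PORT A =====
-- A's if/elif chain reassigning `char`
def pvLeetA (c : Char) : Char :=
  if c = 'a' ∨ c = 'A' then '4'
  else if c = 'i' ∨ c = 'I' then '1'
  else if c = 'e' ∨ c = 'E' then '3'
  else if c = 's' ∨ c = 'S' then '5'
  else if c = 'b' ∨ c = 'B' then '8'
  else if c = 'o' ∨ c = 'O' then '0'
  else c

-- A's loop body: state = (word, i, output); strings as List Char.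
-- `word[:i]` = take i and `word[i+1:]` = drop (i+1): exact since i ≥ 0.
def pvStepA (st : List Char × Nat × List (List Char)) (c : Char) : List Char × Nat × List (List Char) :=
  let c' := pvLeetA c
  let w := st.1.take st.2.1 ++ [c'] ++ st.1.drop (st.2.1 + 1)
  let i := st.2.1 + 1
  let out := if w ∈ st.2.2 then st.2.2 else st.2.2 ++ [w]
  (w, i, out)

def leet_transforms (word : String) : List String :=
  -- `for char in word` iterates the ORIGINAL string object even as `word` is reassigned
  ((word.toList.foldl pvStepA (word.toList, 0, [])).2.2).map String.ofList

-- ===== PORT B =====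
-- Source B's translation table built with str.maketrans("aAiIeEsSbBoO", "441133558800")
def pvTransPairs : List (Char × Char) :=
  [('a','4'),('A','4'),('i','1'),('I','1'),('e','3'),('E','3'),
   ('s','5'),('S','5'),('b','8'),('B','8'),('o','0'),('O','0')]

-- c.translate(_T): substitute if in the table, else keep the char
def pvTrans (c : Char) : Char :=
  ((pvTransPairs.find? (fun p => p.1 == c)).map (·.2)).getD c

-- Source B's loop body over enumerate(word): state = (pref, out); `word[i+1:]` with
-- i ≥ 0 (enumerate index) = drop (i+1), so `.toNat` is exact here.
def pvStepB (wl : List Char) (st : List Char × List (List Char)) (p : Int × Char) :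
    List Char × List (List Char) :=
  let t := pvTrans p.2
  let pref := st.1 ++ [t]
  let out := if p.1 = 0 ∨ t ≠ p.2 then st.2 ++ [pref ++ wl.drop ((p.1 + 1).toNat)] else st.2
  (pref, out)

def leet_transforms_alt (word : String) : List String :=
  (((PySem.List.enumerate word.toList 0).foldl (pvStepB word.toList) ([], [])).2).map String.ofList

-- ===== PRECONDITION & SPEC =====
def Spec_leet_transforms (word : String) (out : List String) : Prop := out = leet_transforms_alt word
instance (word : String) (out : List String) : Decidable (Spec_leet_transforms word out) := by unfold Spec_leet_transforms; infer_instance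

-- ===== CLAIM (what is proved, stated in full; the proofs are below) =====
def Claim_equal_leet_transforms : Prop := ∀ (word : String), Dom_leet_transforms word → Spec_leet_transforms word (leet_transforms word)

-- ===== LEMMAS AND PROOFS =====

-- the i-th progressive state: fully leeted prefix of length i+1, original tail
def pvState (wl : List Char) (i : Nat) : List Char :=
  (wl.map pvLeetA).take (i + 1) ++ wl.drop (i + 1)

-- A's output loop, reduced to a fold over indices with membership dedup
def pvStepM (wl : List Char) (out : List (List Char)) (i : Nat) : List (List Char) :=
  if pvState wl i ∈ out then out else out ++ [pvState wl i]

-- B's output loop, reduced to a fold over indices with the local emit test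
def pvStepF (wl : List Char) (out : List (List Char)) (i : Nat) : List (List Char) :=
  if i = 0 ∨ pvLeetA (wl.getD i ' ') ≠ wl.getD i ' ' then out ++ [pvState wl i] else out

-- B's translate table computes A's if/elif chain
theorem pvTrans_eq (c : Char) : pvTrans c = pvLeetA c := by
  by_cases h1 : c = 'a'; · subst h1; decide
  by_cases h2 : c = 'A'; · subst h2; decide
  by_cases h3 : c = 'i'; · subst h3; decide
  by_cases h4 : c = 'I'; · subst h4; decide
  by_cases h5 : c = 'e'; · subst h5; decide
  by_cases h6 : c = 'E'; · subst h6; decide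
  by_cases h7 : c = 's'; · subst h7; decide
  by_cases h8 : c = 'S'; · subst h8; decide
  by_cases h9 : c = 'b'; · subst h9; decide
  by_cases h10 : c = 'B'; · subst h10; decide
  by_cases h11 : c = 'o'; · subst h11; decide
  by_cases h12 : c = 'O'; · subst h12; decide
  have hf : List.find? (fun p => p.1 == c) pvTransPairs = none := by
    rw [List.find?_eq_none]
    intro x hx
    fin_cases hx <;> simp only [beq_iff_eq] <;> intro h <;> subst h <;> simp_all
  simp [pvTrans, hf, pvLeetA, h1, h2, h3, h4, h5, h6, h7, h8, h9, h10, h11, h12]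

-- core invariant for A: after consuming `suf` (wl = pre ++ suf),
-- A's state is (leeted prefix ++ suffix, consumed length, fold of pvStepM over remaining indices)
theorem pvLoopA_eq (wl : List Char) : ∀ (suf pre : List Char) (out : List (List Char)),
    wl = pre ++ suf →
    suf.foldl pvStepA (pre.map pvLeetA ++ suf, pre.length, out)
      = (wl.map pvLeetA, wl.length,
         (List.range' pre.length suf.length).foldl (pvStepM wl) out) := by
  intro suf
  induction suf with
  | nil =>
    intro pre out h
    simp [h]
  | cons c suf' ih =>
    intro pre out h
    have hw : (pre.map pvLeetA ++ c :: suf').take pre.length = pre.map pvLeetA := by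
      rw [show pre.length = (pre.map pvLeetA).length by simp, List.take_left]
    have hd : (pre.map pvLeetA ++ c :: suf').drop (pre.length + 1) = suf' := by
      rw [show pre.map pvLeetA ++ c :: suf' = (pre.map pvLeetA ++ [c]) ++ suf' by simp]
      rw [List.drop_left' (by simp)]
    have htake : (wl.map pvLeetA).take (pre.length + 1) = (pre ++ [c]).map pvLeetA := by
      rw [h, show pre ++ c :: suf' = (pre ++ [c]) ++ suf' by simp]
      rw [List.map_append, List.take_left']
      simp
    have hdrop : wl.drop (pre.length + 1) = suf' := by
      rw [h, show pre ++ c :: suf' = (pre ++ [c]) ++ suf' by simp]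
      rw [List.drop_left']
      simp
    have hstep : pvStepA (pre.map pvLeetA ++ c :: suf', pre.length, out) c
        = ((pre ++ [c]).map pvLeetA ++ suf', (pre ++ [c]).length, pvStepM wl out pre.length) := by
      simp only [pvStepA, pvStepM, pvState, hw, hd, htake, hdrop]
      simp
    rw [List.foldl_cons, hstep,
        ih (pre ++ [c]) _ (by simp [h]),
        show (c :: suf').length = suf'.length + 1 by simp,
        List.range'_succ]
    simp

-- core invariant for B: the enumerate fold is the index fold of pvStepF,
-- with pref = the leeted consumed prefix
theorem pvLoopB_eq (wl : List Char) : ∀ (suf pre : List Char) (out : List (List Char)),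
    wl = pre ++ suf →
    (PySem.List.enumerate suf (pre.length : Int)).foldl (pvStepB wl) (pre.map pvLeetA, out)
      = (wl.map pvLeetA, (List.range' pre.length suf.length).foldl (pvStepF wl) out) := by
  intro suf
  induction suf with
  | nil =>
    intro pre out h
    simp [PySem.List.enumerate_nil, h]
  | cons c suf' ih =>
    intro pre out h
    have hget : wl.getD pre.length ' ' = c := by
      rw [h]
      rw [List.getD_eq_getElem?_getD, List.getElem?_append_right (le_refl _)]
      simp
    have hdrop : wl.drop (pre.length + 1) = suf' := by
      rw [h, show pre ++ c :: suf' = (pre ++ [c]) ++ suf' by simp]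
      rw [List.drop_left']
      simp
    have hstep : pvStepB wl (pre.map pvLeetA, out) ((pre.length : Int), c)
        = ((pre ++ [c]).map pvLeetA, pvStepF wl out pre.length) := by
      simp only [pvStepB, pvStepF, pvState, pvTrans_eq, hget, hdrop]
      have ht : ((pre.length : Int) + 1).toNat = pre.length + 1 := by omega
      have hc : ((pre.length : Int) = 0 ∨ pvLeetA c ≠ c) ↔ (pre.length = 0 ∨ pvLeetA c ≠ c) := by
        constructor <;> rintro (h0 | hne) <;> [skip; exact Or.inr hne; skip; exact Or.inr hne] <;>
          exact Or.inl (by omega)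
      have htake : (wl.map pvLeetA).take (pre.length + 1) = (pre ++ [c]).map pvLeetA := by
        rw [h, show pre ++ c :: suf' = (pre ++ [c]) ++ suf' by simp]
        rw [List.map_append, List.take_left']
        simp
      rw [ht, hdrop]
      by_cases hcond : pre.length = 0 ∨ pvLeetA c ≠ c
      · rw [if_pos (hc.mpr hcond), if_pos hcond]
        simp [htake]
      · rw [if_neg (fun hh => hcond (hc.mp hh)), if_neg hcond]
        simp
    rw [PySem.List.enumerate_cons, List.foldl_cons, hstep,
        show (c :: suf').length = suf'.length + 1 by simp, List.range'_succ, List.foldl_cons]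
    have := ih (pre ++ [c]) (pvStepF wl out pre.length) (by simp [h])
    simp only [List.length_append, List.length_cons, List.length_nil, Nat.zero_add] at this
    rw [show ((pre.length : Int) + 1) = ((pre.length + 1 : Nat) : Int) by push_cast; ring]
    exact this

-- length and element facts about pvState
theorem pvState_length (wl : List Char) (i : Nat) (h : i < wl.length) :
    (pvState wl i).length = wl.length := by
  simp [pvState]
  omega

theorem pvState_get_self (wl : List Char) (i : Nat) (h : i < wl.length)
    (h' : i < (pvState wl i).length) : (pvState wl i)[i] = pvLeetA wl[i] := by
  simp only [pvState]
  rw [List.getElem_append_left (by simp; omega)]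
  rw [List.getElem_take, List.getElem_map]

theorem pvState_get_later (wl : List Char) (j i : Nat) (hj : j < i) (h : i < wl.length)
    (h' : i < (pvState wl j).length) : (pvState wl j)[i] = wl[i] := by
  have hlen : ((wl.map pvLeetA).take (j + 1)).length = j + 1 := by simp; omega
  apply Option.some.inj
  rw [← List.getElem?_eq_getElem, ← List.getElem?_eq_getElem]
  simp only [pvState]
  rw [List.getElem?_append_right (by omega), hlen, List.getElem?_drop]
  congr 1
  omega

-- a repeated state means the current char is a leet fixed point (contrapositive used)
theorem pvState_ne (wl : List Char) (j i : Nat) (hj : j < i) (h : i < wl.length)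
    (hne : pvLeetA wl[i] ≠ wl[i]) : pvState wl i ≠ pvState wl j := by
  intro heq
  have h1 : i < (pvState wl i).length := by rw [pvState_length wl i h]; exact h
  have h2 : i < (pvState wl j).length := by rw [pvState_length wl j (by omega)]; exact h
  have := pvState_get_self wl i h h1
  have h4 := pvState_get_later wl j i hj h h2
  apply hne
  rw [← this, ← h4]
  congr 1

-- an unchanged char collapses the state onto the previous one
theorem pvState_collapse (wl : List Char) (i : Nat) (hi : 0 < i) (h : i < wl.length)
    (heq : pvLeetA wl[i] = wl[i]) : pvState wl i = pvState wl (i - 1) := by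
  have h1 : i - 1 + 1 = i := by omega
  simp only [pvState, h1]
  have htake : (wl.map pvLeetA).take (i + 1) = (wl.map pvLeetA).take i ++ [wl[i]] := by
    rw [List.take_add_one]
    congr 1
    simp [h, heq]
  have hdropi : wl.drop i = wl[i] :: wl.drop (i + 1) := List.drop_eq_getElem_cons h
  rw [htake, hdropi]
  simp

-- the dedup fold and the local-test fold agree, with the two invariants that drive it
theorem pvDedup_eq (wl : List Char) : ∀ (n : Nat), n ≤ wl.length →
    (List.range' 0 n).foldl (pvStepM wl) [] = (List.range' 0 n).foldl (pvStepF wl) []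
    ∧ (∀ j, j < n → pvState wl j ∈ (List.range' 0 n).foldl (pvStepM wl) [])
    ∧ (∀ x ∈ (List.range' 0 n).foldl (pvStepM wl) [], ∃ j, j < n ∧ x = pvState wl j) := by
  intro n
  induction n with
  | zero => intro _; refine ⟨rfl, by omega, by simp⟩
  | succ n ih =>
    intro hn
    obtain ⟨hEq, hMem, hSub⟩ := ih (by omega)
    have hnlt : n < wl.length := by omega
    have hgd : wl.getD n ' ' = wl[n] := List.getD_eq_getElem wl ' ' hnlt
    rw [List.range'_1_concat, List.foldl_append, List.foldl_append, List.foldl_cons,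
        List.foldl_cons, List.foldl_nil, List.foldl_nil, ← hEq]
    set M := (List.range' 0 n).foldl (pvStepM wl) [] with hM
    simp only [Nat.zero_add]
    by_cases hfix : pvLeetA wl[n] = wl[n]
    · by_cases hz : n = 0
      · subst hz
        have hM0 : M = [] := by rw [hM]; rfl
        refine ⟨?_, ?_, ?_⟩
        · simp [pvStepM, pvStepF, hM0]
        · intro j hj
          interval_cases j
          simp [pvStepM, hM0]
        · intro x hx
          simp [pvStepM, hM0] at hx
          exact ⟨0, by omega, hx⟩
      · have hcol : pvState wl n = pvState wl (n - 1) := pvState_collapse wl n (by omega) hnlt hfix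
        have hmem : pvState wl n ∈ M := by rw [hcol]; exact hMem (n - 1) (by omega)
        refine ⟨?_, ?_, ?_⟩
        · simp only [pvStepM, pvStepF, if_pos hmem, hgd]
          rw [if_neg (by rintro (h0 | h0); exacts [hz h0, h0 hfix])]
        · intro j hj
          simp only [pvStepM, if_pos hmem]
          rcases Nat.lt_succ_iff_lt_or_eq.mp hj with h' | h'
          · exact hMem j h'
          · subst h'; exact hmem
        · intro x hx
          simp only [pvStepM, if_pos hmem] at hx
          obtain ⟨j, hj, hx⟩ := hSub x hx
          exact ⟨j, by omega, hx⟩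
    · have hnmem : pvState wl n ∉ M := by
        intro hmem
        obtain ⟨j, hj, hx⟩ := hSub _ hmem
        exact pvState_ne wl j n hj hnlt hfix hx
      refine ⟨?_, ?_, ?_⟩
      · simp only [pvStepM, pvStepF, if_neg hnmem, hgd]
        rw [if_pos (Or.inr hfix)]
      · intro j hj
        simp only [pvStepM, if_neg hnmem]
        rcases Nat.lt_succ_iff_lt_or_eq.mp hj with h' | h'
        · exact List.mem_append_left _ (hMem j h')
        · subst h'; exact List.mem_append_right _ (by simp)
      · intro x hx
        simp only [pvStepM, if_neg hnmem, List.mem_append, List.mem_singleton] at hx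
        rcases hx with hx | hx
        · obtain ⟨j, hj, hx⟩ := hSub x hx
          exact ⟨j, by omega, hx⟩
        · exact ⟨n, by omega, hx⟩

-- ===== VERDICT (by name: the statement is the Claim_ definition above) =====
theorem leet_transforms_spec : Claim_equal_leet_transforms := by
  intro word _
  unfold Spec_leet_transforms leet_transforms leet_transforms_alt
  have hA := pvLoopA_eq word.toList word.toList [] [] rfl
  have hB := pvLoopB_eq word.toList word.toList [] [] rfl
  simp only [List.map_nil, List.nil_append, List.length_nil, Nat.cast_zero] at hA hB
  rw [hA, hB]
  rw [(pvDedup_eq word.toList word.toList.length (le_refl _)).1]
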